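-- pv_equiv track=rewrite | github.com/le21-j/second-brain | apps/wiki-tutor/wt/wiki.py | _score_query
-- ===== SOURCE A (Python) =====
-- def _score_query(query_tokens: set[str], haystack: set[str]) -> int:
--     """Hybrid scoring so partial typing surfaces relevant pages.
--
--     For each query token: exact whole-token match scores 3, prefix match (a
--     haystack token starts with the query token) scores 2, substring match
--     anywhere in any haystack token scores 1. Substring/prefix matching is
--     skipped for query tokens shorter than 2 chars so a stray letter doesn't
--     match every page.
--     """
--     score = 0
--     for q in query_tokens:
--         if q in haystack:
--             score += 3
--             continue
--         if len(q) < 2: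
--             continue
--         if any(h.startswith(q) for h in haystack):
--             score += 2
--             continue
--         if any(q in h for h in haystack):
--             score += 1
--     return score
-- ===== SOURCE B (Python) =====
-- def _score_query(query_tokens: set[str], haystack: set[str]) -> int:
--     """One aggregating pass over haystack per query token, tracking the best
--     match level (3 exact with early exit, 2 prefix, 1 substring) instead of
--     three separate scans."""
--     score = 0
--     for q in query_tokens:
--         best = 0
--         short = len(q) < 2
--         for h in haystack:
--             if h == q:
--                 best = 3
--                 break
--             if not short:
--                 if h.startswith(q):
--                     best = max(best, 2)
--                 elif q in h:
--                     best = max(best, 1)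
--         score += best
--     return score
-- ===== Notes on version B (the rewrite author's own statement) =====
-- stated objective: alternative
-- what changed: Replaces the exact-membership test plus two short-circuiting any() scans per query token with a single pass over haystack that tracks the best match level (3 exact with break, 2 prefix, 1 substring) and adds it to the score.
import Mathlib
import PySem

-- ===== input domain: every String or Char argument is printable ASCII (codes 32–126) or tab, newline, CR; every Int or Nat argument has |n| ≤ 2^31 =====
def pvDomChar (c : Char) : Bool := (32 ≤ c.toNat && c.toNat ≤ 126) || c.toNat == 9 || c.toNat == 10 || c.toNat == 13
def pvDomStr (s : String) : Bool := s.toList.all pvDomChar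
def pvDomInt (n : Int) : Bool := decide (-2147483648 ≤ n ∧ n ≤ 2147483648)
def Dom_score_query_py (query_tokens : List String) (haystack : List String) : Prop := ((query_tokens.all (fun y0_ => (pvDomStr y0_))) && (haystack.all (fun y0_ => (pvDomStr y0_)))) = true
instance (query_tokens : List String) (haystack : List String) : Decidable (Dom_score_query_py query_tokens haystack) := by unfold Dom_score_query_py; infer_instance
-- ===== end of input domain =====

-- B replaces A's membership check plus two any() scans per query token with one
-- aggregating pass over haystack tracking the best match level (alternative decomposition, same cost).

-- ===== PORT A =====
def score_query_py (query_tokens : List String) (haystack : List String) : Int :=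
  query_tokens.foldl (fun score q =>
    if haystack.contains q then score + 3
    else if PySem.Str.len q < 2 then score
    else if haystack.any (fun h => PySem.Str.startswith h q) then score + 2
    else if haystack.any (fun h => PySem.Str.isIn q h) then score + 1
    else score) 0

-- ===== PORT B =====
-- inner loop of Source B: best-match level for one query token, early exit on exact match
def bestLoop (q : String) (short : Bool) (hs : List String) (best : Int) : Int :=
  match hs with
  | [] => best
  | h :: t =>
    if h == q then 3
    else if !short then
      if PySem.Str.startswith h q then bestLoop q short t (max best 2)
      else if PySem.Str.isIn q h then bestLoop q short t (max best 1)
      else bestLoop q short t best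
    else bestLoop q short t best

def score_query_py_alt (query_tokens : List String) (haystack : List String) : Int :=
  query_tokens.foldl (fun score q =>
    score + bestLoop q (decide (PySem.Str.len q < 2)) haystack 0) 0

-- ===== PRECONDITION & SPEC =====
def Spec_score_query_py (query_tokens : List String) (haystack : List String) (out : Int) : Prop := out = score_query_py_alt query_tokens haystack
instance (query_tokens : List String) (haystack : List String) (out : Int) : Decidable (Spec_score_query_py query_tokens haystack out) := by unfold Spec_score_query_py; infer_instance

-- ===== CLAIM (what is proved, stated in full; the proofs are below) =====
def Claim_equal_score_query_py : Prop := ∀ (query_tokens : List String) (haystack : List String), Dom_score_query_py query_tokens haystack → Spec_score_query_py query_tokens haystack (score_query_py query_tokens haystack)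

-- ===== LEMMAS AND PROOFS =====

-- characterisation of B's inner loop (for best ≤ 2; the running best never exceeds 2)
lemma bestLoop_eq (q : String) (short : Bool) (hs : List String) (best : Int)
    (hb : best ≤ 2) :
    bestLoop q short hs best =
      if hs.contains q then 3
      else if short then best
      else if hs.any (fun h => PySem.Str.startswith h q) then max best 2
      else if hs.any (fun h => PySem.Str.isIn q h) then max best 1
      else best := by
  induction hs generalizing best with
  | nil => simp [bestLoop]
  | cons h t ih =>
    by_cases hq : h = q
    · subst hq; simp [bestLoop]
    · have hbq : (h == q) = false := by simp [hq]
      have hqb : (q == h) = false := by simp [Ne.symm hq]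
      have hcons : (h :: t).contains q = t.contains q := by
        rw [List.contains_cons, hqb, Bool.false_or]
      cases short with
      | true =>
        have hstep : bestLoop q true (h :: t) best = bestLoop q true t best := by
          simp [bestLoop, hbq]
        rw [hstep, ih best hb, hcons]
        simp
      | false =>
        simp only [bestLoop, hbq, Bool.false_eq_true, if_false, Bool.not_false,
          hcons, List.any_cons]
        by_cases hp : PySem.Str.startswith h q = true
        · rw [if_pos hp, ih (max best 2) (by omega)]
          simp only [hp, Bool.true_or]
          split_ifs <;> first | rfl | exact (False.elim (by assumption)) | (rw [max_assoc]; norm_num)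
        · rw [if_neg hp]
          
          simp only [(Bool.eq_false_iff.mpr hp : PySem.Str.startswith h q = false), Bool.false_or]
          by_cases hsub : PySem.Str.isIn q h = true
          · rw [if_pos hsub, ih (max best 1) (by omega)]
            simp only [hsub, Bool.true_or]
            split_ifs <;> first | rfl | exact (False.elim (by assumption)) | (rw [max_assoc]; norm_num)
          · rw [if_neg hsub, ih best hb]
            simp only [(Bool.eq_false_iff.mpr hsub : PySem.Str.isIn q h = false), Bool.false_or]
            split_ifs <;> first | rfl | exact (False.elim (by assumption))

-- the two per-token steps agree
lemma step_eq (hs : List String) (s : Int) (q : String) :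
    (if hs.contains q then s + 3
     else if PySem.Str.len q < 2 then s
     else if hs.any (fun h => PySem.Str.startswith h q) then s + 2
     else if hs.any (fun h => PySem.Str.isIn q h) then s + 1
     else s)
    = s + bestLoop q (decide (PySem.Str.len q < 2)) hs 0 := by
  rw [bestLoop_eq q _ hs 0 (by omega)]
  by_cases hlen : PySem.Str.len q < 2 <;> split_ifs <;> simp_all <;> omega

lemma fold_eq (hs : List String) (qs : List String) (s : Int) :
    qs.foldl (fun score q =>
      if hs.contains q then score + 3
      else if PySem.Str.len q < 2 then score
      else if hs.any (fun h => PySem.Str.startswith h q) then score + 2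
      else if hs.any (fun h => PySem.Str.isIn q h) then score + 1
      else score) s
    = qs.foldl (fun score q =>
        score + bestLoop q (decide (PySem.Str.len q < 2)) hs 0) s := by
  induction qs generalizing s with
  | nil => rfl
  | cons q t ih => rw [List.foldl_cons, List.foldl_cons, step_eq, ih]

-- ===== VERDICT (by name: the statement is the Claim_ definition above) =====
theorem score_query_py_spec : Claim_equal_score_query_py := by
  intro qs hs _
  unfold Spec_score_query_py score_query_py score_query_py_alt
  exact fold_eq hs qs 0
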